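-- pv_equiv track=rewrite | github.com/grimsage999/Sentinel | backend 20-15-57-708/app/services/mitre_attack_service.py | build_attack_narrative
-- ===== SOURCE A (Python) =====
-- from typing import Dict, List, Optional, Any
-- from enum import Enum
--
-- class AttackTactic(Enum):
--     """MITRE ATT&CK Tactics relevant to phishing"""
--     INITIAL_ACCESS = "initial-access"
--     EXECUTION = "execution"
--     PERSISTENCE = "persistence"
--     PRIVILEGE_ESCALATION = "privilege-escalation"
--     DEFENSE_EVASION = "defense-evasion"
--     CREDENTIAL_ACCESS = "credential-access"
--     DISCOVERY = "discovery"
--     COLLECTION = "collection"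
--     COMMAND_AND_CONTROL = "command-and-control"
--     EXFILTRATION = "exfiltration"
--     IMPACT = "impact"
--
-- def build_attack_narrative(techniques: List[Dict[str, Any]]) -> str:
--     """
--     Build a narrative explaining the attack chain using MITRE ATT&CK
--
--     Args:
--         techniques: List of applicable MITRE ATT&CK techniques
--
--     Returns:
--         Human-readable attack narrative
--     """
--     if not techniques:
--         return "No specific attack techniques identified."
--
--     # Group techniques by tactic
--     tactics_map = {}
--     for technique in techniques:
--         tactic = technique['tactic']
--         if tactic not in tactics_map:
--             tactics_map[tactic] = []
--         tactics_map[tactic].append(technique)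
--
--     # Build narrative based on attack chain
--     narrative_parts = []
--
--     # Initial Access
--     if AttackTactic.INITIAL_ACCESS.value in tactics_map:
--         techniques_list = tactics_map[AttackTactic.INITIAL_ACCESS.value]
--         narrative_parts.append(
--             f"**Initial Access**: The attacker uses {', '.join([t['name'] for t in techniques_list])} "
--             f"to gain initial access to the target environment."
--         )
--
--     # Execution
--     if AttackTactic.EXECUTION.value in tactics_map:
--         techniques_list = tactics_map[AttackTactic.EXECUTION.value]
--         narrative_parts.append(
--             f"**Execution**: The attack relies on {', '.join([t['name'] for t in techniques_list])} "
--             f"to execute malicious code or actions."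
--         )
--
--     # Credential Access
--     if AttackTactic.CREDENTIAL_ACCESS.value in tactics_map:
--         techniques_list = tactics_map[AttackTactic.CREDENTIAL_ACCESS.value]
--         narrative_parts.append(
--             f"**Credential Access**: The attacker attempts {', '.join([t['name'] for t in techniques_list])} "
--             f"to steal user credentials."
--         )
--
--     # Collection
--     if AttackTactic.COLLECTION.value in tactics_map:
--         techniques_list = tactics_map[AttackTactic.COLLECTION.value]
--         narrative_parts.append(
--             f"**Collection**: The attack involves {', '.join([t['name'] for t in techniques_list])} "
--             f"to gather sensitive information."
--         )
--
--     # Defense Evasion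
--     if AttackTactic.DEFENSE_EVASION.value in tactics_map:
--         techniques_list = tactics_map[AttackTactic.DEFENSE_EVASION.value]
--         narrative_parts.append(
--             f"**Defense Evasion**: The attacker uses {', '.join([t['name'] for t in techniques_list])} "
--             f"to avoid detection."
--         )
--
--     return "\n\n".join(narrative_parts)
-- ===== SOURCE B (Python) =====
-- # Table-driven rewrite: one ordered (tactic, prefix, suffix) table replaces the
-- # grouping dict and the five hand-written branches; per tactic a single filter
-- # pass collects the names.
-- _NARRATIVE_TABLE = [
--     ("initial-access",
--      "**Initial Access**: The attacker uses ",
--      " to gain initial access to the target environment."),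
--     ("execution",
--      "**Execution**: The attack relies on ",
--      " to execute malicious code or actions."),
--     ("credential-access",
--      "**Credential Access**: The attacker attempts ",
--      " to steal user credentials."),
--     ("collection",
--      "**Collection**: The attack involves ",
--      " to gather sensitive information."),
--     ("defense-evasion",
--      "**Defense Evasion**: The attacker uses ",
--      " to avoid detection."),
-- ]
--
-- def build_attack_narrative(techniques):
--     if not techniques:
--         return "No specific attack techniques identified."
--     parts = []
--     for tactic, prefix, suffix in _NARRATIVE_TABLE:
--         names = [t['name'] for t in techniques if t['tactic'] == tactic]
--         if names:
--             parts.append(prefix + ', '.join(names) + suffix)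
--     return "\n\n".join(parts)
-- ===== Notes on version B (the rewrite author's own statement) =====
-- stated objective: simpler
-- what changed: Replaces the grouping dict plus five copy-pasted if-branches with one ordered (tactic, prefix, suffix) table and a single loop that filters names per tactic.
import Mathlib
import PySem

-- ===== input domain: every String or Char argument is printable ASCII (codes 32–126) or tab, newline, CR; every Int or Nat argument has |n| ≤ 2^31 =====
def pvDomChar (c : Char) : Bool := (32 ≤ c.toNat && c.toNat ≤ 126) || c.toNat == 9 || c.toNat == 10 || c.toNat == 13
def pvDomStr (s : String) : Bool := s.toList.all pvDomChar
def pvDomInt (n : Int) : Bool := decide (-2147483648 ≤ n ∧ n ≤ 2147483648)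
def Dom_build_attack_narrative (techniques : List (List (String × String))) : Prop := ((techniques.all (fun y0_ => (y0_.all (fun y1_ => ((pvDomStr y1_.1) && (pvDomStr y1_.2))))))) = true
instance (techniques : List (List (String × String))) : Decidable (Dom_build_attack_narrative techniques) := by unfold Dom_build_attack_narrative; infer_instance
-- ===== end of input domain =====

-- B replaces A's grouping dict + five copy-pasted branches by one ordered
-- (tactic, prefix, suffix) table and a single loop filtering names per tactic
-- (objective: simpler).  A raises KeyError on missing 'tactic'/'name' keys;
-- Pre_ excludes exactly those inputs.

-- shared helper: Python dict lookup on an association list (first match)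
def pyGetKey? (t : List (String × String)) (k : String) : Option String :=
  (t.find? (fun p => p.1 == k)).map (·.2)

-- ===== PORT A =====
-- t['tactic'] / t['name']; the .getD "" default is unreachable under Pre_
def pvTacticOf (t : List (String × String)) : String := (pyGetKey? t "tactic").getD ""
def pvNameOf (t : List (String × String)) : String := (pyGetKey? t "name").getD ""

def build_attack_narrative (techniques : List (List (String × String))) : String :=
  if techniques.isEmpty then "No specific attack techniques identified."
  else
    -- for technique in techniques: tactics_map.setdefault(tactic, []).append(technique)
    let tactics_map : PySem.Dict String (List (List (String × String))) :=
      techniques.foldl (fun m t => m.modify (pvTacticOf t) [] (fun l => l ++ [t])) PySem.Dict.empty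
    let narrative_parts : List String := []
    let narrative_parts :=
      if tactics_map.contains "initial-access" then
        narrative_parts ++ ["**Initial Access**: The attacker uses " ++
          PySem.Str.join ", " ((tactics_map.getD "initial-access" []).map pvNameOf) ++
          " to gain initial access to the target environment."]
      else narrative_parts
    let narrative_parts :=
      if tactics_map.contains "execution" then
        narrative_parts ++ ["**Execution**: The attack relies on " ++
          PySem.Str.join ", " ((tactics_map.getD "execution" []).map pvNameOf) ++
          " to execute malicious code or actions."]
      else narrative_parts
    let narrative_parts :=
      if tactics_map.contains "credential-access" then
        narrative_parts ++ ["**Credential Access**: The attacker attempts " ++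
          PySem.Str.join ", " ((tactics_map.getD "credential-access" []).map pvNameOf) ++
          " to steal user credentials."]
      else narrative_parts
    let narrative_parts :=
      if tactics_map.contains "collection" then
        narrative_parts ++ ["**Collection**: The attack involves " ++
          PySem.Str.join ", " ((tactics_map.getD "collection" []).map pvNameOf) ++
          " to gather sensitive information."]
      else narrative_parts
    let narrative_parts :=
      if tactics_map.contains "defense-evasion" then
        narrative_parts ++ ["**Defense Evasion**: The attacker uses " ++
          PySem.Str.join ", " ((tactics_map.getD "defense-evasion" []).map pvNameOf) ++
          " to avoid detection."]
      else narrative_parts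
    PySem.Str.join "\n\n" narrative_parts

-- ===== PORT B =====
def pvNarrativeTable : List (String × String × String) :=
  [("initial-access", "**Initial Access**: The attacker uses ",
    " to gain initial access to the target environment."),
   ("execution", "**Execution**: The attack relies on ",
    " to execute malicious code or actions."),
   ("credential-access", "**Credential Access**: The attacker attempts ",
    " to steal user credentials."),
   ("collection", "**Collection**: The attack involves ",
    " to gather sensitive information."),
   ("defense-evasion", "**Defense Evasion**: The attacker uses ",
    " to avoid detection.")]

def build_attack_narrative_alt (techniques : List (List (String × String))) : String :=
  if techniques.isEmpty then "No specific attack techniques identified."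
  else
    PySem.Str.join "\n\n" <| pvNarrativeTable.foldl (fun parts e =>
      let names := (techniques.filter (fun t => pvTacticOf t == e.1)).map pvNameOf
      if names.isEmpty then parts else parts ++ [e.2.1 ++ PySem.Str.join ", " names ++ e.2.2]) []

-- ===== PRECONDITION & SPEC =====
-- Pre_ excludes exactly the inputs where Python A raises KeyError: a technique
-- without a 'tactic' key, or one whose tactic is among the five narrated
-- tactics but which lacks a 'name' key.
def Pre_build_attack_narrative (techniques : List (List (String × String))) : Prop :=
  ∀ t ∈ techniques, (pyGetKey? t "tactic").isSome = true ∧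
    (pvTacticOf t ∈ pvNarrativeTable.map (·.1) → (pyGetKey? t "name").isSome = true)
instance (techniques : List (List (String × String))) : Decidable (Pre_build_attack_narrative techniques) := by unfold Pre_build_attack_narrative; infer_instance

def pvWitness_build_attack_narrative : (List (List (String × String))) :=
  [[("tactic", "initial-access"), ("name", "Phishing")], [("tactic", "impact")]]

def Spec_build_attack_narrative (techniques : List (List (String × String))) (out : String) : Prop := out = build_attack_narrative_alt techniques
instance (techniques : List (List (String × String))) (out : String) : Decidable (Spec_build_attack_narrative techniques out) := by unfold Spec_build_attack_narrative; infer_instance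

-- ===== CLAIM (what is proved, stated in full; the proofs are below) =====
def Claim_equal_build_attack_narrative : Prop := ∀ (techniques : List (List (String × String))), Dom_build_attack_narrative techniques → Pre_build_attack_narrative techniques → Spec_build_attack_narrative techniques (build_attack_narrative techniques)

-- ===== LEMMAS AND PROOFS =====

-- the grouping fold: membership in the map ↔ some technique has that tactic
theorem grp_contains (l : List (List (String × String)))
    (d : PySem.Dict String (List (List (String × String)))) (c : String) :
    (l.foldl (fun m t => m.modify (pvTacticOf t) [] (fun l => l ++ [t])) d).contains c =
      (d.contains c || l.any (fun t => pvTacticOf t == c)) := by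
  induction l generalizing d with
  | nil => simp
  | cons h tl ih =>
    simp only [List.foldl_cons, List.any_cons, ih, PySem.Dict.contains_modify]
    by_cases hc : pvTacticOf h == c
    · have hceq : pvTacticOf h = c := beq_iff_eq.mp hc
      simp [hceq]
    · have hne : (c == pvTacticOf h) = false :=
        beq_eq_false_iff_ne.mpr (fun h' => hc (beq_iff_eq.mpr h'.symm))
      have h2 : (pvTacticOf h == c) = false := by simpa using hc
      simp [hne, h2]

-- the grouping fold: the group at c is the sublist of techniques with tactic c
theorem grp_getD (l : List (List (String × String)))
    (d : PySem.Dict String (List (List (String × String)))) (c : String) :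
    (l.foldl (fun m t => m.modify (pvTacticOf t) [] (fun l => l ++ [t])) d).getD c [] =
      d.getD c [] ++ l.filter (fun t => pvTacticOf t == c) := by
  induction l generalizing d with
  | nil => simp
  | cons h tl ih =>
    simp only [List.foldl_cons, List.filter_cons, ih, PySem.Dict.getD_modify]
    by_cases hc : pvTacticOf h == c
    · have hceq : pvTacticOf h = c := beq_iff_eq.mp hc
      simp [hceq]
    · have : ¬ (c = pvTacticOf h) := fun h' => hc (beq_iff_eq.mpr h'.symm)
      simp [hc, this]

-- one table entry of B equals the corresponding branch of A
theorem branch_eq (l : List (List (String × String))) (c pre suf : String) (parts : List String) :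
    (let names := (l.filter (fun t => pvTacticOf t == c)).map pvNameOf
     if names.isEmpty then parts else parts ++ [pre ++ PySem.Str.join ", " names ++ suf]) =
    (if (l.foldl (fun m t => m.modify (pvTacticOf t) [] (fun l => l ++ [t]))
          PySem.Dict.empty).contains c then
       parts ++ [pre ++ PySem.Str.join ", "
         (((l.foldl (fun m t => m.modify (pvTacticOf t) [] (fun l => l ++ [t]))
            PySem.Dict.empty).getD c []).map pvNameOf) ++ suf]
     else parts) := by
  simp only [grp_contains, grp_getD, PySem.Dict.contains_empty, PySem.Dict.getD_empty,
    Bool.false_or, List.nil_append, List.isEmpty_iff, List.map_eq_nil_iff]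
  by_cases h : l.any (fun t => pvTacticOf t == c) = true
  · have hne : l.filter (fun t => pvTacticOf t == c) ≠ [] := by
      simp only [ne_eq, List.filter_eq_nil_iff]
      obtain ⟨t, ht, hp⟩ := List.any_eq_true.mp h
      exact fun hall => hall t ht hp
    simp [h, hne]
  · have he : l.filter (fun t => pvTacticOf t == c) = [] := by
      simp only [List.filter_eq_nil_iff]
      intro t ht hp
      exact h (List.any_eq_true.mpr ⟨t, ht, hp⟩)
    simp [h, he]

-- ===== VERDICT (by name: the statement is the Claim_ definition above) =====
theorem build_attack_narrative_spec : Claim_equal_build_attack_narrative := by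
  intro techniques _ _
  unfold Spec_build_attack_narrative build_attack_narrative build_attack_narrative_alt
  by_cases he : techniques.isEmpty
  · simp [he]
  · simp only [he]
    simp only [pvNarrativeTable, List.foldl_cons, List.foldl_nil]
    rw [branch_eq, branch_eq, branch_eq, branch_eq, branch_eq]
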